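-- pv_equiv track=rewrite | github.com/MarcosMello/Prog1 | EP/2021200102.py | recEStrat
-- ===== SOURCE A (Python) =====
-- def recEStrat(lSimb, L = [], i = 0, j = 0):
--     """
--     Função responsavel por verificar, a partir de uma lista,
--     quais movimentos são possíveis usando as condições de vitória. - Função
--         de Recursão.
--
--     Parâmetros:
--     lSimb (lista) (int): Posições que vão ser verificadas para saber quais
--         condições de vitória poderiam ocorrer.
--     L (lista) (lista) (int) (opc): Lista usada na recursão com as posições que
--         podem gerar uma vitória.
--     i (int) (opc): Variável contadora de recursão responsável por iterar por
--         todos elementos de lSimb.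
--     j (int) (opc): Variável contadora de recursão responsável por iterar por
--         todos elementos de pos.
--
--     Retorno:
--     L (lista) (lista) (int): Valores que podem gerar uma vitória.
--     """
--     pos = [[1, 2, 3], [5, 4, 6], [7, 8, 9], [1, 4, 7], [5, 2, 8], [3, 6, 9], [5, 1, 9], [5, 7, 3]] #Posições de vitória, como mostado no primeiro exemplo do PDF.
--     if len(lSimb) > i: #Usado para ter acesso as listas dentro da lista.
--         if len(pos) > j: #Usado para ter acesso aos itens dentro das listas dentro da lista.
--             if lSimb[i] in pos[j]: #Verifica se a posição que eu recebo de fSim está em alguma dessas possíbilidades.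
--                 return recEStrat(lSimb, L + [pos[j]], i, j + 1)
--             return recEStrat(lSimb, L, i, j + 1)
--         return recEStrat(lSimb, L, i + 1, 0) #Retorna j para 0 para pular para a próxima lista
--     return L
-- ===== SOURCE B (Python) =====
-- def _hits(lSimb, pos, a, start):
--     return [pos[b] for b in range(start, len(pos)) if lSimb[a] in pos[b]]
--
-- def recEStrat(lSimb, L = [], i = 0, j = 0):
--     pos = [[1, 2, 3], [5, 4, 6], [7, 8, 9], [1, 4, 7], [5, 2, 8], [3, 6, 9], [5, 1, 9], [5, 7, 3]]
--     return L + [p for a in range(i, len(lSimb))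
--                   for p in _hits(lSimb, pos, a, j if a == i else 0)]
-- ===== Notes on version B (the rewrite author's own statement) =====
-- stated objective: simpler
-- what changed: replaces the tail recursion over the (i, j) counter pair with a flat list comprehension (a per-row filter helper over the triples) appended to L once
import Mathlib
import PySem

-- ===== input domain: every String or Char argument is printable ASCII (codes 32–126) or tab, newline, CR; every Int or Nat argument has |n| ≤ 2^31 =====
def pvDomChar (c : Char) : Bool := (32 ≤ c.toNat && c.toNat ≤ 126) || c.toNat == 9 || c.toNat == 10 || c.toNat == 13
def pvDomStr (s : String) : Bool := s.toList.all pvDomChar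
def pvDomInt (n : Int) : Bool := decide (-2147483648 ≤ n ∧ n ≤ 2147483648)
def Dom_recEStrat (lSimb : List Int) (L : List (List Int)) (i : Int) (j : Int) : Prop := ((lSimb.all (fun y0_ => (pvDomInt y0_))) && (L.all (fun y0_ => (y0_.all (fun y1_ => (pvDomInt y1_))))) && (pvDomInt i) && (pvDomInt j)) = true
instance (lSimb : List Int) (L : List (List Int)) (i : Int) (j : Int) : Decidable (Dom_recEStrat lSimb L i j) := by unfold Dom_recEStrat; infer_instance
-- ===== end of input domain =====

-- B replaces the (i, j) counter-pair tail recursion by a flat comprehension appended to L once (simpler); same values everywhere A returns.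

-- ===== PORT A =====
-- the fixed win-position triples (the local `pos` of A)
def pvPosA : List (List Int) := [[1, 2, 3], [5, 4, 6], [7, 8, 9], [1, 4, 7], [5, 2, 8], [3, 6, 9], [5, 1, 9], [5, 7, 3]]

def recEStrat (lSimb : List Int) (L : List (List Int)) (i : Int) (j : Int) : List (List Int) :=
  if _h1 : ((lSimb.length : Int)) > i then
    if _h2 : ((pvPosA.length : Int)) > j then
      -- `lSimb[i] in pos[j]`; an out-of-range index is an IndexError in Python (excluded by Pre_), the `.getD` default never fires there
      if ((PySem.List.pyGet? lSimb i).getD 0) ∈ ((PySem.List.pyGet? pvPosA j).getD []) then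
        recEStrat lSimb (L ++ [(PySem.List.pyGet? pvPosA j).getD []]) i (j + 1)
      else
        recEStrat lSimb L i (j + 1)
    else
      recEStrat lSimb L (i + 1) 0
  else L
termination_by ((((lSimb.length : Int)) - i).toNat, (((pvPosA.length : Int)) - j).toNat)
decreasing_by
  · apply Prod.Lex.right; omega
  · apply Prod.Lex.right; omega
  · apply Prod.Lex.left; omega

-- ===== PORT B =====
def pvPosB : List (List Int) := [[1, 2, 3], [5, 4, 6], [7, 8, 9], [1, 4, 7], [5, 2, 8], [3, 6, 9], [5, 1, 9], [5, 7, 3]]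

-- B's helper `_hits`: the triples from pos[start:] (scanned by index) containing lSimb[a]
def pvHits (lSimb : List Int) (pos : List (List Int)) (a : Int) (start : Int) : List (List Int) :=
  ((PySem.List.pyRange start ((pos.length : Int)) 1).filter
      (fun b => decide (((PySem.List.pyGet? lSimb a).getD 0) ∈ ((PySem.List.pyGet? pos b).getD [])))).map
    (fun b => (PySem.List.pyGet? pos b).getD [])

def recEStrat_alt (lSimb : List Int) (L : List (List Int)) (i : Int) (j : Int) : List (List Int) :=
  L ++ (PySem.List.pyRange i ((lSimb.length : Int)) 1).flatMap
        (fun a => pvHits lSimb pvPosB a (if a = i then j else 0))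

-- ===== PRECONDITION & SPEC =====
-- Pre_ excludes exactly the inputs on which Python A raises IndexError (an index below -len reached by
-- lSimb[i] or pos[j]); on every input satisfying Pre_ the Python A returns normally.
def Pre_recEStrat (lSimb : List Int) (L : List (List Int)) (i : Int) (j : Int) : Prop :=
  ((lSimb.length : Int) ≤ i) ∨
  (j < 8 ∧ -(lSimb.length : Int) ≤ i ∧ -8 ≤ j) ∨
  (8 ≤ j ∧ -(lSimb.length : Int) ≤ i + 1)
instance (lSimb : List Int) (L : List (List Int)) (i : Int) (j : Int) : Decidable (Pre_recEStrat lSimb L i j) := by unfold Pre_recEStrat; infer_instance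

def pvWitness_recEStrat : List Int × List (List Int) × Int × Int := ([1, 5], [], 0, 0)

def Spec_recEStrat (lSimb : List Int) (L : List (List Int)) (i : Int) (j : Int) (out : List (List Int)) : Prop := out = recEStrat_alt lSimb L i j
instance (lSimb : List Int) (L : List (List Int)) (i : Int) (j : Int) (out : List (List Int)) : Decidable (Spec_recEStrat lSimb L i j out) := by unfold Spec_recEStrat; infer_instance

-- ===== CLAIM (what is proved, stated in full; the proofs are below) =====
def Claim_equal_recEStrat : Prop := ∀ (lSimb : List Int) (L : List (List Int)) (i : Int) (j : Int), Dom_recEStrat lSimb L i j → Pre_recEStrat lSimb L i j → Spec_recEStrat lSimb L i j (recEStrat lSimb L i j)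

-- ===== LEMMAS AND PROOFS =====

-- the flat part of B, after L
def pvTail (lSimb : List Int) (i j : Int) : List (List Int) :=
  (PySem.List.pyRange i ((lSimb.length : Int)) 1).flatMap
    (fun a => pvHits lSimb pvPosB a (if a = i then j else 0))

theorem alt_eq_tail (lSimb : List Int) (L : List (List Int)) (i j : Int) :
    recEStrat_alt lSimb L i j = L ++ pvTail lSimb i j := rfl

theorem tail_done (lSimb : List Int) (i j : Int) (h : (lSimb.length : Int) ≤ i) :
    pvTail lSimb i j = [] := by
  unfold pvTail
  rw [PySem.List.pyRange_one_eq_nil h]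
  rfl

theorem tail_row_done (lSimb : List Int) (i j : Int)
    (h1 : i < (lSimb.length : Int)) (h2 : (8 : Int) ≤ j) :
    pvTail lSimb i j = pvTail lSimb (i + 1) 0 := by
  unfold pvTail
  rw [PySem.List.pyRange_one_cons h1]
  simp only [List.flatMap_cons, ite_true]
  rw [show pvHits lSimb pvPosB i j = [] from by
    unfold pvHits
    rw [PySem.List.pyRange_one_eq_nil (by simp [pvPosB]; omega)]
    rfl]
  simp only [List.nil_append, List.flatMap]
  congr 1
  apply List.map_congr_left
  intro a hmem
  have hb := (PySem.List.mem_pyRange_one.mp hmem).1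
  simp only [show ¬ (a = i) from by omega, if_false, ite_self]

theorem tail_step (lSimb : List Int) (i j : Int)
    (h1 : i < (lSimb.length : Int)) (h2 : j < (8 : Int)) :
    pvTail lSimb i j =
      (if ((PySem.List.pyGet? lSimb i).getD 0) ∈ ((PySem.List.pyGet? pvPosB j).getD []) then
         [(PySem.List.pyGet? pvPosB j).getD []] else [])
      ++ pvTail lSimb i (j + 1) := by
  unfold pvTail
  rw [PySem.List.pyRange_one_cons h1]
  simp only [List.flatMap_cons, ite_true]
  rw [show pvHits lSimb pvPosB i j
        = (if ((PySem.List.pyGet? lSimb i).getD 0) ∈ ((PySem.List.pyGet? pvPosB j).getD []) then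
             [(PySem.List.pyGet? pvPosB j).getD []] else [])
          ++ pvHits lSimb pvPosB i (j + 1) from by
    unfold pvHits
    rw [show (PySem.List.pyRange j ((pvPosB.length : Int)) 1)
          = j :: PySem.List.pyRange (j + 1) ((pvPosB.length : Int)) 1 from
      PySem.List.pyRange_one_cons (by simp [pvPosB]; omega)]
    rw [List.filter_cons]
    by_cases hm : ((PySem.List.pyGet? lSimb i).getD 0) ∈ ((PySem.List.pyGet? pvPosB j).getD [])
    · rw [if_pos hm, if_pos (by simp [hm]), List.map_cons, List.singleton_append]
    · rw [if_neg hm, if_neg (by simp [hm]), List.nil_append]]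
  rw [List.append_assoc]
  congr 1
  simp only [List.flatMap]
  congr 2
  apply List.map_congr_left
  intro a hmem
  have hb := (PySem.List.mem_pyRange_one.mp hmem).1
  simp only [show ¬ (a = i) from by omega, if_false]

theorem recEStrat_eq_alt (lSimb : List Int) (L : List (List Int)) (i j : Int) :
    recEStrat lSimb L i j = recEStrat_alt lSimb L i j := by
  induction L, i, j using recEStrat.induct lSimb with
  | case1 L i j h1 h2 hmem ih =>
    have h2' : j < (8 : Int) := by simpa [pvPosA] using h2
    rw [recEStrat, dif_pos h1, dif_pos h2, if_pos hmem, ih,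
        alt_eq_tail, alt_eq_tail, tail_step lSimb i j h1 h2',
        if_pos (by simpa only [pvPosA, pvPosB] using hmem)]
    simp only [pvPosA, pvPosB, List.append_assoc, List.singleton_append]
  | case2 L i j h1 h2 hmem ih =>
    have h2' : j < (8 : Int) := by simpa [pvPosA] using h2
    rw [recEStrat, dif_pos h1, dif_pos h2, if_neg hmem, ih,
        alt_eq_tail, alt_eq_tail, tail_step lSimb i j h1 h2',
        if_neg (by simpa only [pvPosA, pvPosB] using hmem)]
    rw [List.nil_append]
  | case3 L i j h1 h2 ih =>
    have h2' : (8 : Int) ≤ j := by simpa [pvPosA] using h2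
    rw [recEStrat, dif_pos h1, dif_neg h2, ih, alt_eq_tail, alt_eq_tail,
        tail_row_done lSimb i j h1 h2']
  | case4 L i j h1 =>
    rw [recEStrat, dif_neg h1, alt_eq_tail, tail_done lSimb i j (by omega),
        List.append_nil]

-- ===== VERDICT (by name: the statement is the Claim_ definition above) =====
theorem recEStrat_spec : Claim_equal_recEStrat := by
  intro lSimb L i j _ _
  unfold Spec_recEStrat
  exact recEStrat_eq_alt lSimb L i j
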